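-- pv_equiv track=rewrite | github.com/adw3r/targets_api | app/utils.py | add_test_emails
-- ===== SOURCE A (Python) =====
-- def add_test_emails(emails_list: list, suffix) -> list:
--     updated_list = emails_list.copy()
--     step = 500
--     cc = step
--     c = 1
--     while cc < len(updated_list):
--         updated_list.insert(cc, f'softumwork+{suffix}{c}@gmail.com')
--         cc += step
--         c += 1
--     return updated_list
-- ===== SOURCE B (Python) =====
-- def add_test_emails(emails_list: list, suffix) -> list:
--     # Build the result by concatenating whole slices between the (pre-computed)
--     # insertion boundaries b_c = 499*c + 1 instead of repeatedly inserting.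
--     n = len(emails_list)
--     out = []
--     prev = 0
--     c = 1
--     while 499 * c + 1 < n:
--         b = 499 * c + 1
--         out.extend(emails_list[prev:b])
--         out.append(f'softumwork+{suffix}{c}@gmail.com')
--         prev = b
--         c += 1
--     out.extend(emails_list[prev:])
--     return out
-- ===== Notes on version B (the rewrite author's own statement) =====
-- stated objective: alternative
-- what changed: Replaces the grow-and-insert while loop (repeated list.insert into a mutated copy) with a rebuild that precomputes the insertion boundaries 499*c+1 and concatenates whole slices of the input with the emails between them.
import Mathlib
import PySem

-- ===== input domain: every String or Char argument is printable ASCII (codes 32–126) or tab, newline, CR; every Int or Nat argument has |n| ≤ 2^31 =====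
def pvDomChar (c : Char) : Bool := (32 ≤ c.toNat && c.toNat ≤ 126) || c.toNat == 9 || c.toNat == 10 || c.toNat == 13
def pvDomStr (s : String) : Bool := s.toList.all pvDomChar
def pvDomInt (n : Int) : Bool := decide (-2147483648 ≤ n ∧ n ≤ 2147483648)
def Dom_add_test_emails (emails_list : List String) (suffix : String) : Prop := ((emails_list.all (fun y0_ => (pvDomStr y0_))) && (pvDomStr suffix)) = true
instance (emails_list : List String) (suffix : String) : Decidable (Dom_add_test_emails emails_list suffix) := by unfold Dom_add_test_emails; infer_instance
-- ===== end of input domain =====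

-- B rebuilds the list by concatenating the slices between the pre-computed insertion
-- boundaries 499*c+1 instead of repeatedly inserting into a growing copy (objective: alternative decomposition).

-- f'softumwork+{suffix}{c}@gmail.com' (c is a nonnegative Python int; str(c) = Int.toStr c)
def emailStr (suffix : String) (c : Nat) : String :=
  "softumwork+" ++ suffix ++ PySem.Int.toStr (c : Int) ++ "@gmail.com"

-- ===== PORT A =====
-- the while loop; cc and c stay nonnegative in Python, so Nat counters are exact
def addLoop (suffix : String) (updated : List String) (cc c : Nat) : List String :=
  if cc < updated.length then
    addLoop suffix (PySem.List.insert updated (cc : Int) (emailStr suffix c)) (cc + 500) (c + 1)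
  else updated
termination_by updated.length - cc
decreasing_by simp [PySem.List.length_insert]; omega

def add_test_emails (emails_list : List String) (suffix : String) : List String :=
  addLoop suffix emails_list 500 1

-- ===== PORT B =====
-- the while loop of Source B; out accumulates slices and the inserted emails
def altLoop (suffix : String) (emails : List String) (n prev c : Nat) (out : List String) : List String :=
  if 499 * c + 1 < n then
    altLoop suffix emails n (499 * c + 1) (c + 1)
      (out ++ PySem.List.slice emails (some (prev : Int)) (some ((499 * c + 1 : Nat) : Int))
           ++ [emailStr suffix c])
  else out ++ PySem.List.slice emails (some (prev : Int)) none
termination_by n - c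
decreasing_by omega

def add_test_emails_alt (emails_list : List String) (suffix : String) : List String :=
  altLoop suffix emails_list emails_list.length 0 1 []

-- ===== PRECONDITION & SPEC =====
def Spec_add_test_emails (emails_list : List String) (suffix : String) (out : List String) : Prop := out = add_test_emails_alt emails_list suffix
instance (emails_list : List String) (suffix : String) (out : List String) : Decidable (Spec_add_test_emails emails_list suffix out) := by unfold Spec_add_test_emails; infer_instance

-- ===== CLAIM (what is proved, stated in full; the proofs are below) =====
def Claim_equal_add_test_emails : Prop := ∀ (emails_list : List String) (suffix : String), Dom_add_test_emails emails_list suffix → Spec_add_test_emails emails_list suffix (add_test_emails emails_list suffix)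

-- ===== LEMMAS AND PROOFS =====

-- common characterisation: process the remaining tail, inserting at offset e+1 into it
def tailLoop (suffix : String) (tail : List String) (c e : Nat) : List String :=
  if e + 1 < tail.length then
    tail.take (e + 1) ++ emailStr suffix c :: tailLoop suffix (tail.drop (e + 1)) (c + 1) 498
  else tail
termination_by tail.length
decreasing_by simp; omega

lemma addLoop_eq_tailLoop (suffix : String) :
    ∀ (k : Nat) (tl : List String) (c e : Nat) (out : List String), tl.length = k →
    addLoop suffix (out ++ tl) (out.length + (e + 1)) c = out ++ tailLoop suffix tl c e := by
  intro k
  induction k using Nat.strong_induction_on with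
  | _ k ih =>
    intro tl c e out hk
    rw [addLoop, tailLoop]
    by_cases h : e + 1 < tl.length
    · have hc : out.length + (e + 1) < (out ++ tl).length := by simp; omega
      rw [if_pos hc, if_pos h]
      rw [PySem.List.insert_natCast _ _ _ (by simp; omega)]
      have htk : (out ++ tl).take (out.length + (e + 1)) = out ++ tl.take (e + 1) := by
        simp [List.take_append]
      have hdr : (out ++ tl).drop (out.length + (e + 1)) = tl.drop (e + 1) := by
        simp [List.drop_append]
      rw [htk, hdr]
      have h2 := ih (tl.drop (e + 1)).length (by simp; omega) (tl.drop (e + 1)) (c + 1) 498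
        (out ++ tl.take (e + 1) ++ [emailStr suffix c]) rfl
      have hlen : (out ++ tl.take (e + 1) ++ [emailStr suffix c]).length + (498 + 1)
          = out.length + (e + 1) + 500 := by
        simp [List.length_take, Nat.min_eq_left (Nat.le_of_lt h)]; omega
      have h3 : (out ++ tl.take (e + 1)) ++ emailStr suffix c :: tl.drop (e + 1)
          = (out ++ tl.take (e + 1) ++ [emailStr suffix c]) ++ tl.drop (e + 1) := by simp
      rw [h3, ← hlen, h2]
      simp
    · have hc : ¬ out.length + (e + 1) < (out ++ tl).length := by simp; omega
      rw [if_neg hc, if_neg h]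

lemma altLoop_eq_tailLoop (suffix : String) (emails : List String) :
    ∀ (k c prev : Nat) (out : List String), emails.length - c = k → prev ≤ 499 * c →
    altLoop suffix emails emails.length prev c out
      = out ++ tailLoop suffix (emails.drop prev) c (499 * c - prev) := by
  intro k
  induction k using Nat.strong_induction_on with
  | _ k ih =>
    intro c prev out hk hp
    rw [altLoop, tailLoop]
    by_cases h : 499 * c + 1 < emails.length
    · rw [if_pos h]
      have hcond : 499 * c - prev + 1 < (emails.drop prev).length := by simp; omega
      rw [if_pos hcond]
      rw [PySem.List.slice_natCast]
      have h2 := ih (emails.length - (c + 1)) (by omega) (c + 1) (499 * c + 1)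
        (out ++ (emails.drop prev).take (499 * c + 1 - prev) ++ [emailStr suffix c]) rfl (by omega)
      rw [h2]
      have hdd : (emails.drop prev).drop (499 * c - prev + 1) = emails.drop (499 * c + 1) := by
        rw [List.drop_drop]; congr 1; omega
      have ht : 499 * c + 1 - prev = 499 * c - prev + 1 := by omega
      have he : 499 * (c + 1) - (499 * c + 1) = 498 := by omega
      rw [ht, hdd, he]
      simp
    · rw [if_neg h, PySem.List.slice_from_natCast]
      have : ¬ 499 * c - prev + 1 < (emails.drop prev).length := by simp; omega
      rw [if_neg this]

-- ===== VERDICT (by name: the statement is the Claim_ definition above) =====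
theorem add_test_emails_spec : Claim_equal_add_test_emails := by
  intro emails_list suffix _
  show add_test_emails emails_list suffix = add_test_emails_alt emails_list suffix
  have hA := addLoop_eq_tailLoop suffix emails_list.length emails_list 1 499 [] rfl
  have hB := altLoop_eq_tailLoop suffix emails_list (emails_list.length - 1) 1 0 [] rfl (by omega)
  simp at hA hB
  simpa [add_test_emails, add_test_emails_alt, hB] using hA
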